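-- pv_equiv track=rewrite | github.com/polycyber/PolyPwnCTF-2025-Challenges | WEB/doctor-strange-proxy-multiverse/conteneur_api/server.py | rot18
-- ===== SOURCE A (Python) =====
-- def rot18(text):
--     def shift_char(c):
--         if 'a' <= c <= 'z':
--             return chr(((ord(c) - ord('a') + 18) % 26) + ord('a'))
--         elif 'A' <= c <= 'Z':
--             return chr(((ord(c) - ord('A') + 18) % 26) + ord('A'))
--         return c  # Leave non-alphabet characters unchanged
--
--     return ''.join(shift_char(c) for c in text)
-- ===== SOURCE B (Python) =====
-- def rot18(text):
--     lower = 'abcdefghijklmnopqrstuvwxyz'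
--     upper = lower.upper()
--     table = str.maketrans(lower + upper,
--                           lower[18:] + lower[:18] + upper[18:] + upper[:18])
--     return text.translate(table)
-- ===== Notes on version B (the rewrite author's own statement) =====
-- stated objective: idiomatic
-- what changed: Replaces the per-character Python-level branch-and-arithmetic generator loop with a translation table built once from alphabet slices and a single C-level text.translate call.
import Mathlib
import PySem

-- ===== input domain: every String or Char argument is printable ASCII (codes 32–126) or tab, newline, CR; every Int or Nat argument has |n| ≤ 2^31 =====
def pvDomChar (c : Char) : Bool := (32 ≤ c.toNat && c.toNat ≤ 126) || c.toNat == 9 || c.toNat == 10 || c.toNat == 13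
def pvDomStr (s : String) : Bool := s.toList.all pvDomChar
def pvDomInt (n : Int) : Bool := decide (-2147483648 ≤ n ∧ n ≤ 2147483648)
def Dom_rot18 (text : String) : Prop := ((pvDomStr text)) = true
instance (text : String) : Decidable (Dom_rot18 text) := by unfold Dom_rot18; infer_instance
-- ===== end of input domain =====

-- B replaces A's per-character branch-and-arithmetic loop with a translation table
-- built once from alphabet slices and a single table-driven pass (idiomatic).

-- ===== PORT A =====
-- shift_char: branch on the letter range, shift by 18 mod 26
def pvShiftChar (c : Char) : Char :=
  if 'a' ≤ c ∧ c ≤ 'z' then Char.ofNat (((c.toNat - 'a'.toNat + 18) % 26) + 'a'.toNat)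
  else if 'A' ≤ c ∧ c ≤ 'Z' then Char.ofNat (((c.toNat - 'A'.toNat + 18) % 26) + 'A'.toNat)
  else c

def rot18 (text : String) : String :=
  String.mk (text.toList.map pvShiftChar)

-- ===== PORT B =====
def pvLowerB : List Char := "abcdefghijklmnopqrstuvwxyz".toList
-- lower.upper()
def pvUpperB : List Char := PySem.Chars.upper pvLowerB
-- str.maketrans(lower+upper, lower[18:]+lower[:18]+upper[18:]+upper[:18]) as a Dict
def pvTableB : PySem.Dict Char Char :=
  PySem.Dict.ofList (List.zip (pvLowerB ++ pvUpperB)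
    ((pvLowerB.drop 18 ++ pvLowerB.take 18) ++ (pvUpperB.drop 18 ++ pvUpperB.take 18)))
-- text.translate(table): each char mapped through the table, unmapped chars unchanged
def rot18_alt (text : String) : String :=
  String.mk (text.toList.map (fun c => pvTableB.getD c c))

-- ===== PRECONDITION & SPEC =====
def Spec_rot18 (text : String) (out : String) : Prop := out = rot18_alt text
instance (text : String) (out : String) : Decidable (Spec_rot18 text out) := by unfold Spec_rot18; infer_instance

-- ===== CLAIM (what is proved, stated in full; the proofs are below) =====
def Claim_equal_rot18 : Prop := ∀ (text : String), Dom_rot18 text → Spec_rot18 text (rot18 text)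

-- ===== LEMMAS AND PROOFS =====
set_option maxRecDepth 4000 in
theorem pv_key : ∀ n : Nat, n < 127 →
    pvShiftChar (Char.ofNat n) = pvTableB.getD (Char.ofNat n) (Char.ofNat n) := by decide

set_option maxRecDepth 4000 in
theorem pv_perChar (c : Char) (h : pvDomChar c = true) :
    pvShiftChar c = pvTableB.getD c c := by
  have hlt : c.toNat < 127 := by
    simp [pvDomChar] at h
    omega
  have := pv_key c.toNat hlt
  rwa [Char.ofNat_toNat] at this

set_option maxRecDepth 8000 in
theorem pv_map_eq : ∀ l : List Char, l.all pvDomChar = true →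
    l.map pvShiftChar = l.map (fun c => pvTableB.getD c c) := by
  intro l hl
  induction l with
  | nil => rfl
  | cons c t ih =>
    simp only [List.all_cons, Bool.and_eq_true] at hl
    simp [List.map, ih hl.2, pv_perChar c hl.1]

-- ===== VERDICT (by name: the statement is the Claim_ definition above) =====
theorem rot18_spec : Claim_equal_rot18 := by
  intro text hdom
  unfold Spec_rot18 rot18 rot18_alt
  exact congrArg String.mk (pv_map_eq text.toList hdom)
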